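-- pv_equiv track=rewrite | github.com/GaloisInc/SocialCyberLAGOON | lagoon/fusion/transformations.py | get_name_from_item
-- ===== SOURCE A (Python) =====
-- def get_name_from_item(item, separators=None):
--     """
--     The complete item can read as 'Lionel Messi (star), Argentine footballer'
--     We just want the part before the comma / semicolon / colon and without the brackets, i.e. Lionel Messi
--     """
--     separators = separators or [',', ';', ':']
--     indexes = []
--     for sep in separators:
--         index = item.find(sep)
--         indexes.append(index if index != -1 else len(item))
--
--     name = item[:min(indexes)]
--     return name
-- ===== SOURCE B (Python) =====
-- def get_name_from_item(item, separators=None):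
--     separators = separators or [',', ';', ':']
--     for i in range(len(item)):
--         if any(item[i:].startswith(sep) for sep in separators):
--             return item[:i]
--     return item
-- ===== Notes on version B (the rewrite author's own statement) =====
-- stated objective: faster
-- what changed: Instead of computing item.find(sep) over the whole string for every separator, collecting the indices and slicing at their minimum, B scans positions left to right once and returns the prefix at the first position where any separator matches (prefix test), falling back to the whole item.
import Mathlib
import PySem

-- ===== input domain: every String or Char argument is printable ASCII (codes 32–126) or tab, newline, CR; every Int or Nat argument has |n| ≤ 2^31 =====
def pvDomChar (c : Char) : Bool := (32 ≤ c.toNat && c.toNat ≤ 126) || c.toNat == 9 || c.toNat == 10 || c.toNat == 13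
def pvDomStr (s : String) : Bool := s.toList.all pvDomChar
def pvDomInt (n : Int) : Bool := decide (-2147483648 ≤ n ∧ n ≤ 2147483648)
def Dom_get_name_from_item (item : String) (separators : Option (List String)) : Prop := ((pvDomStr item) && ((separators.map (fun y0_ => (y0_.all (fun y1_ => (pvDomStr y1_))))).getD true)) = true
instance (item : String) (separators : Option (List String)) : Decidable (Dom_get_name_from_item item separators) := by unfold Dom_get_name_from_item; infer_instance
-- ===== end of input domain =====

-- B replaces A's per-separator find + min with a single left-to-right position scan
-- that returns at the first position where any separator matches as a prefix (objective: alternative).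

-- `separators = separators or [',', ';', ':']` (None and [] are falsy), shared by both Pythons
def pvResolveSeps (separators : Option (List String)) : List (List Char) :=
  (match separators with
   | none => [",", ";", ":"]
   | some l => if l.isEmpty then [",", ";", ":"] else l).map String.toList

-- ===== PORT A =====
def get_name_from_item (item : String) (separators : Option (List String)) : String :=
  let s := item.toList
  let seps := pvResolveSeps separators
  -- for sep in separators: index = item.find(sep); indexes.append(index if index != -1 else len(item))
  let indexes : List Int := seps.foldl (fun acc sep =>
    let index := PySem.Chars.find s sep
    acc ++ [if index ≠ -1 then index else (s.length : Int)]) []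
  -- name = item[:min(indexes)]  (indexes is nonempty: the resolved separator list is nonempty)
  match PySem.List.min? indexes (fun x => x) with
  | some m => String.ofList (PySem.List.slice s none (some m))
  | none => ""  -- unreachable

-- ===== PORT B =====
-- the loop 'for i in range(len(item)): if any(item[i:].startswith(sep) ...): return item[:i]';
-- pre holds the first i characters reversed, suf = item[i:]
def altGo (seps : List (List Char)) : List Char → List Char → Option (List Char)
  | _, [] => none
  | pre, c :: rest =>
      if seps.any (fun sep => PySem.Chars.startswith (c :: rest) sep) then some pre.reverse
      else altGo seps (c :: pre) rest

def get_name_from_item_alt (item : String) (separators : Option (List String)) : String :=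
  let seps := pvResolveSeps separators
  match altGo seps [] item.toList with
  | some pre => String.ofList pre
  | none => item

-- ===== PRECONDITION & SPEC =====
def Spec_get_name_from_item (item : String) (separators : Option (List String)) (out : String) : Prop := out = get_name_from_item_alt item separators
instance (item : String) (separators : Option (List String)) (out : String) : Decidable (Spec_get_name_from_item item separators out) := by unfold Spec_get_name_from_item; infer_instance

-- ===== CLAIM (what is proved, stated in full; the proofs are below) =====
def Claim_equal_get_name_from_item : Prop := ∀ (item : String) (separators : Option (List String)), Dom_get_name_from_item item separators → Spec_get_name_from_item item separators (get_name_from_item item separators)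

-- ===== LEMMAS AND PROOFS =====

lemma pvResolveSeps_ne_nil (separators : Option (List String)) : pvResolveSeps separators ≠ [] := by
  unfold pvResolveSeps
  cases separators with
  | none => simp
  | some l =>
    by_cases h : l.isEmpty <;> simp [h]
    exact fun hc => (List.isEmpty_iff.mpr hc ▸ h) rfl

-- the foldl that appends one value per sep is a map
lemma foldl_append_map {α β : Type} (f : α → β) (l : List α) (acc : List β) :
    l.foldl (fun acc x => acc ++ [f x]) acc = acc ++ l.map f := by
  induction l generalizing acc with
  | nil => simp
  | cons x t ih => simp [List.foldl, ih]

-- effective index a sep contributes (the body of A's loop)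
def pvEff (s sep : List Char) : Int :=
  if PySem.Chars.find s sep ≠ -1 then PySem.Chars.find s sep else (s.length : Int)

lemma pvEff_nonneg (s sep : List Char) : 0 ≤ pvEff s sep := by
  have := PySem.Chars.neg_one_le_find s sep
  unfold pvEff; split <;> omega

lemma pvEff_le_length (s sep : List Char) : pvEff s sep ≤ (s.length : Int) := by
  have := PySem.Chars.find_le_length s sep
  unfold pvEff; split <;> omega

-- a prefix occurrence at i forces pvEff ≤ i
lemma pvEff_le_of_prefix (s sep : List Char) (i : Nat) (h : sep <+: s.drop i) :
    pvEff s sep ≤ (i : Int) := by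
  have hin : PySem.Chars.isIn sep s = true :=
    (PySem.Chars.exists_prefix_drop_iff_isIn sep s).mp ⟨i, h⟩
  have hne : PySem.Chars.find s sep ≠ -1 :=
    (PySem.Chars.find_ne_neg_one_iff s sep).mpr ((PySem.Chars.isIn_iff_infix sep s).mp hin)
  have hnn : 0 ≤ PySem.Chars.find s sep := by
    have := PySem.Chars.neg_one_le_find s sep; omega
  have hspec := (PySem.Chars.find_spec hnn).2
  by_contra hc
  push Not at hc
  have hi : i < (PySem.Chars.find s sep).toNat := by
    unfold pvEff at hc
    rw [if_pos hne] at hc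
    omega
  exact hspec i hi h

-- where found, there is a prefix occurrence at pvEff
lemma pvEff_prefix (s sep : List Char) (h : PySem.Chars.find s sep ≠ -1) :
    sep <+: s.drop (pvEff s sep).toNat := by
  have hnn : 0 ≤ PySem.Chars.find s sep := by
    have := PySem.Chars.neg_one_le_find s sep; omega
  have := (PySem.Chars.find_spec hnn).1
  unfold pvEff
  rw [if_pos h]
  exact this

-- altGo returns none when no position < suf.length matches
lemma altGo_none (seps : List (List Char)) :
    ∀ (suf pre : List Char),
      (∀ i < suf.length, seps.any (fun sep => PySem.Chars.startswith (suf.drop i) sep) = false) →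
      altGo seps pre suf = none := by
  intro suf
  induction suf with
  | nil => intro pre _; rfl
  | cons c rest ih =>
    intro pre h
    have h0 := h 0 (by simp)
    simp only [List.drop] at h0
    rw [altGo, h0]
    simp only [Bool.false_eq_true, if_false]
    exact ih _ (fun i hi => by
      have := h (i + 1) (by simpa using Nat.succ_lt_succ hi)
      simpa using this)

-- altGo returns the prefix of length M at the first matching position M
lemma altGo_some (seps : List (List Char)) :
    ∀ (M : Nat) (suf pre : List Char), M < suf.length →
      seps.any (fun sep => PySem.Chars.startswith (suf.drop M) sep) = true →
      (∀ i < M, seps.any (fun sep => PySem.Chars.startswith (suf.drop i) sep) = false) →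
      altGo seps pre suf = some (pre.reverse ++ suf.take M) := by
  intro M
  induction M with
  | zero =>
    intro suf pre hlen hm _
    cases suf with
    | nil => simp at hlen
    | cons c rest =>
      simp only [List.drop] at hm
      rw [altGo, hm]
      simp
  | succ M ih =>
    intro suf pre hlen hm hbefore
    cases suf with
    | nil => simp at hlen
    | cons c rest =>
      have h0 := hbefore 0 (Nat.succ_pos M)
      simp only [List.drop] at h0
      rw [altGo, h0]
      simp only [Bool.false_eq_true, if_false]
      have := ih rest (c :: pre) (by simpa using Nat.lt_of_succ_lt_succ hlen)
        (by simpa using hm)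
        (fun i hi => by
          have := hbefore (i + 1) (Nat.succ_lt_succ hi)
          simpa using this)
      rw [this]
      simp

-- the heart of the equivalence: min-of-finds slice = first-match scan
lemma core (item : String) (seps : List (List Char)) (hne : seps ≠ []) :
    (match PySem.List.min? (seps.map (pvEff item.toList)) (fun x => x) with
     | some m => String.ofList (PySem.List.slice item.toList none (some m))
     | none => "") =
    (match altGo seps [] item.toList with
     | some pre => String.ofList pre
     | none => item) := by
  set s := item.toList with hs
  have hnil : seps.map (pvEff s) ≠ [] := by simpa using hne
  obtain ⟨m, hm⟩ : ∃ m, PySem.List.min? (seps.map (pvEff s)) (fun x => x) = some m := by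
    cases hc : PySem.List.min? (seps.map (pvEff s)) (fun x => x) with
    | none => exact absurd ((PySem.List.min?_eq_none_iff _ _).mp hc) hnil
    | some m => exact ⟨m, rfl⟩
  rw [hm]
  obtain ⟨sep0, hsep0, hmeq⟩ := List.mem_map.mp (PySem.List.min?_mem hm)
  have hmin : ∀ sep ∈ seps, m ≤ pvEff s sep := by
    intro sep hsep
    exact PySem.List.min?_isMin hm _ (List.mem_map.mpr ⟨sep, hsep, rfl⟩)
  have hm0 : 0 ≤ m := hmeq ▸ pvEff_nonneg s sep0
  have hmlen : m ≤ (s.length : Int) := hmeq ▸ pvEff_le_length s sep0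
  show String.ofList (PySem.List.slice s none (some m)) =
    (match altGo seps [] s with
     | some pre => String.ofList pre
     | none => item)
  rw [PySem.List.slice_to s hm0]
  have hnone_before : ∀ i : Nat, (i : Int) < m →
      seps.any (fun sep => PySem.Chars.startswith (s.drop i) sep) = false := by
    intro i hi
    by_contra hc
    rw [Bool.not_eq_false, List.any_eq_true] at hc
    obtain ⟨sep, hsep, hsw⟩ := hc
    have hpre := (PySem.Chars.startswith_iff _ _).mp hsw
    have := pvEff_le_of_prefix s sep i hpre
    have := hmin sep hsep
    omega
  by_cases hM : m.toNat < s.length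
  · -- a separator really occurs: the scan stops exactly at m
    have hfind : PySem.Chars.find s sep0 ≠ -1 := by
      intro hc
      have : pvEff s sep0 = (s.length : Int) := by unfold pvEff; simp [hc]
      omega
    have hpre0 : sep0 <+: s.drop m.toNat := hmeq ▸ pvEff_prefix s sep0 hfind
    have hmatch : seps.any (fun sep => PySem.Chars.startswith (s.drop m.toNat) sep) = true :=
      List.any_eq_true.mpr ⟨sep0, hsep0, (PySem.Chars.startswith_iff _ _).mpr hpre0⟩
    rw [altGo_some seps m.toNat s [] hM hmatch
      (fun i hi => hnone_before i (by omega))]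
    simp
  · -- no separator occurs: m = len(item), both sides return the whole item
    have hml : m = (s.length : Int) := by omega
    rw [altGo_none seps s []
      (fun i hi => hnone_before i (by omega))]
    rw [hml]
    simp only [Int.toNat_natCast, List.take_length, hs, String.ofList_toList]

theorem get_name_from_item_equiv (item : String) (separators : Option (List String)) :
    get_name_from_item item separators = get_name_from_item_alt item separators := by
  have key := core item (pvResolveSeps separators) (pvResolveSeps_ne_nil separators)
  unfold get_name_from_item get_name_from_item_alt
  simp only [foldl_append_map, List.nil_append]
  exact key

-- ===== VERDICT (by name: the statement is the Claim_ definition above) =====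
theorem get_name_from_item_spec : Claim_equal_get_name_from_item := by
  intro item separators _
  exact get_name_from_item_equiv item separators
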